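-- pv_equiv track=rewrite | github.com/kiselevskaya/Bioinformatics | genome_sequencing/assemble_genomes/k_d_mer_composition.py | k_d_mer_composition
-- ===== SOURCE A (Python) =====
-- def k_d_mer_composition(text, k, d):
--     composition = {}
--     for i in range(len(text)-(2*k+d)+1):
--         if text[i:i+k] not in composition.keys():
--             composition[text[i:i+k]] = [text[i+k+d:i+2*k+d]]
--         else:
--             composition[text[i:i+k]].append(text[i+k+d:i+2*k+d])
--     return dict(sorted(composition.items()))
-- ===== SOURCE B (Python) =====
-- def k_d_mer_composition(text, k, d):
--     pairs = [(text[i:i+k], text[i+k+d:i+2*k+d])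
--              for i in range(len(text)-(2*k+d)+1)]
--     return {p: [s for q, s in pairs if q == p]
--             for p in sorted({q for q, _ in pairs})}
-- ===== Notes on version B (the rewrite author's own statement) =====
-- stated objective: alternative
-- what changed: Replaces the incremental dict-building loop (insert-or-append per position, then sort the items) by a two-phase comprehension: build the (prefix,suffix) pair list once, take the sorted set of distinct prefixes, and for each of them collect its suffixes by filtering the pair list in text order.
import Mathlib
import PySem

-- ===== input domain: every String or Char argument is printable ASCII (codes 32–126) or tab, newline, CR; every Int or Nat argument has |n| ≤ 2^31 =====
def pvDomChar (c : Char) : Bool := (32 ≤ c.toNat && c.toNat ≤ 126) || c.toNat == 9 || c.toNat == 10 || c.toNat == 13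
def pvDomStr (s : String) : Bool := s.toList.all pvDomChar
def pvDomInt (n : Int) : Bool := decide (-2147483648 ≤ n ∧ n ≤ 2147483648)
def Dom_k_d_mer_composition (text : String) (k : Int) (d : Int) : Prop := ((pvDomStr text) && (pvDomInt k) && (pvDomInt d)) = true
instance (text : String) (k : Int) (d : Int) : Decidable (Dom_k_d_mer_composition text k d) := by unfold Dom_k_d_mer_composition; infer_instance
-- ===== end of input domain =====

-- B replaces A's incremental insert-or-append dict loop by a two-phase comprehension
-- (pair list once, sorted set of distinct prefixes, suffixes collected by filtering);
-- objective: alternative (same results, different decomposition; not claimed faster).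

-- ===== PORT A =====
def k_d_mer_composition (text : String) (k : Int) (d : Int) : List (String × List String) :=
  let composition : PySem.Dict String (List String) :=
    (PySem.List.pyRange 0 (PySem.Str.len text - (2*k+d) + 1) 1).foldl
      (fun c i =>
        if c.contains (PySem.Str.slice text (some i) (some (i+k))) = false then
          c.insert (PySem.Str.slice text (some i) (some (i+k)))
            [PySem.Str.slice text (some (i+k+d)) (some (i+2*k+d))]
        else
          c.modify (PySem.Str.slice text (some i) (some (i+k))) []
            (fun l => l ++ [PySem.Str.slice text (some (i+k+d)) (some (i+2*k+d))]))
      PySem.Dict.empty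
  PySem.List.sorted2 composition.items (fun p => p.1) (fun p => p.2) false

-- ===== PORT B =====
def k_d_mer_composition_alt (text : String) (k : Int) (d : Int) : List (String × List String) :=
  let pairs : List (String × String) :=
    (PySem.List.pyRange 0 (PySem.Str.len text - (2*k+d) + 1) 1).map
      (fun i => (PySem.Str.slice text (some i) (some (i+k)),
                 PySem.Str.slice text (some (i+k+d)) (some (i+2*k+d))))
  (PySem.List.sorted (PySem.Set.ofList (pairs.map (fun q => q.1))) (fun x => x) false).map
    (fun p => (p, (pairs.filter (fun q => q.1 == p)).map (fun q => q.2)))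

-- ===== PRECONDITION & SPEC =====
def Spec_k_d_mer_composition (text : String) (k : Int) (d : Int) (out : List (String × List String)) : Prop := out = k_d_mer_composition_alt text k d
instance (text : String) (k : Int) (d : Int) (out : List (String × List String)) : Decidable (Spec_k_d_mer_composition text k d out) := by unfold Spec_k_d_mer_composition; infer_instance

-- ===== CLAIM (what is proved, stated in full; the proofs are below) =====
def Claim_equal_k_d_mer_composition : Prop := ∀ (text : String) (k : Int) (d : Int), Dom_k_d_mer_composition text k d → Spec_k_d_mer_composition text k d (k_d_mer_composition text k d)

-- ===== LEMMAS AND PROOFS =====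

-- A's insert-or-append branch is exactly dict.modify with default [].
theorem pv_step_eq_modify (c : PySem.Dict String (List String)) (key suf : String) :
    (if c.contains key = false then c.insert key [suf]
     else c.modify key [] (fun l => l ++ [suf])) = c.modify key [] (fun l => l ++ [suf]) := by
  split_ifs with h
  · simp [PySem.Dict.modify, PySem.Dict.getD_of_not_contains _ _ h]
  · rfl

-- items of a dict with nodup keys, written as a map over its keys
theorem pv_items_eq_map_keys (d : PySem.Dict String (List String)) (h : d.keys.Nodup) :
    d.items = d.keys.map (fun kk => (kk, d.getD kk [])) := by
  show d.items = (d.items.map (fun p => p.1)).map (fun kk => (kk, d.getD kk []))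
  rw [List.map_map]
  conv_lhs => rw [← List.map_id d.items]
  apply List.map_congr_left
  intro p hp
  have : d.getD p.1 [] = p.2 := PySem.Dict.getD_of_mem_items d (k := p.1) (v := p.2) hp h []
  simp [this]

-- insertBy only consults 'before' between the inserted element and list members
theorem pv_insertBy_congr {α : Type} (b1 b2 : α → α → Bool) (x : α) (ys : List α)
    (h : ∀ y ∈ ys, b1 x y = b2 x y) :
    PySem.List.insertBy b1 x ys = PySem.List.insertBy b2 x ys := by
  induction ys with
  | nil => rfl
  | cons y ys ih =>
    simp only [PySem.List.insertBy]
    rw [h y (by simp)]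
    split_ifs
    · rfl
    · rw [ih (fun z hz => h z (by simp [hz]))]

-- with pairwise-distinct first components, the lexicographic tuple comparison of
-- sorted2 and the prefix-only comparison of sorted insert identically
theorem pv_before_eq (a b : String × List String) (hne : a.1 ≠ b.1) :
    (decide (a.1 < b.1) || (!decide (b.1 < a.1) && decide (a.2 < b.2))) = decide (a.1 < b.1) := by
  rcases lt_trichotomy a.1 b.1 with h | h | h
  · simp [h, asymm h]
  · exact absurd h hne
  · simp [h, asymm h]

theorem pv_foldl_insertBy_congr (l acc : List (String × List String))
    (hl : l.Pairwise (fun a b => a.1 ≠ b.1))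
    (hacc : ∀ a ∈ l, ∀ b ∈ acc, a.1 ≠ b.1) :
    l.foldl (fun acc x => PySem.List.insertBy
        (fun a b => decide (a.1 < b.1) || (!decide (b.1 < a.1) && decide (a.2 < b.2))) x acc) acc
    = l.foldl (fun acc x => PySem.List.insertBy (fun a b => decide (a.1 < b.1)) x acc) acc := by
  induction l generalizing acc with
  | nil => rfl
  | cons x l ih =>
    rcases List.pairwise_cons.mp hl with ⟨hx, hl'⟩
    have hstep : PySem.List.insertBy
        (fun a b => decide (a.1 < b.1) || (!decide (b.1 < a.1) && decide (a.2 < b.2))) x acc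
        = PySem.List.insertBy (fun a b => decide (a.1 < b.1)) x acc := by
      exact pv_insertBy_congr _ _ x acc (fun y hy => pv_before_eq x y (hacc x (by simp) y hy))
    simp only [List.foldl_cons, hstep]
    refine ih _ hl' ?_
    intro a ha b hb
    rcases (PySem.List.mem_insertBy _ x b acc).mp hb with rfl | hb'
    · exact fun hEq => hx a ha hEq.symm
    · exact hacc a (by simp [ha]) b hb'

-- sorted2 over a list with nodup first components is sorted by the first component
theorem pv_sorted2_eq_sorted (xs : List (String × List String))
    (h : (xs.map (fun p => p.1)).Nodup) :
    PySem.List.sorted2 xs (fun p => p.1) (fun p => p.2) false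
      = PySem.List.sorted xs (fun p => p.1) false := by
  have hpw : xs.Pairwise (fun a b => a.1 ≠ b.1) := by
    have := h
    rw [List.nodup_iff_pairwise_ne, List.pairwise_map] at this
    exact this
  rw [PySem.List.sorted_eq_foldl_insertBy]
  simp only [PySem.List.sorted2]
  exact pv_foldl_insertBy_congr xs [] hpw (by simp)

-- ===== VERDICT (by name: the statement is the Claim_ definition above) =====
theorem k_d_mer_composition_spec : Claim_equal_k_d_mer_composition := by
  intro text k d _
  unfold Spec_k_d_mer_composition k_d_mer_composition k_d_mer_composition_alt
  set f : Int → String × String := fun i =>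
    (PySem.Str.slice text (some i) (some (i+k)),
     PySem.Str.slice text (some (i+k+d)) (some (i+2*k+d))) with hf
  set L : List (String × String) :=
    (PySem.List.pyRange 0 (PySem.Str.len text - (2*k+d) + 1) 1).map f with hL
  -- A's fold over indices = fold over the pair list L, with the modify step
  have hfoldA :
      (PySem.List.pyRange 0 (PySem.Str.len text - (2*k+d) + 1) 1).foldl
        (fun c i =>
          if c.contains (PySem.Str.slice text (some i) (some (i+k))) = false then
            c.insert (PySem.Str.slice text (some i) (some (i+k)))
              [PySem.Str.slice text (some (i+k+d)) (some (i+2*k+d))]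
          else
            c.modify (PySem.Str.slice text (some i) (some (i+k))) []
              (fun l => l ++ [PySem.Str.slice text (some (i+k+d)) (some (i+2*k+d))]))
        PySem.Dict.empty
      = L.foldl (fun c q => c.modify q.1 [] (fun l => l ++ [q.2])) PySem.Dict.empty := by
    rw [hL, List.foldl_map]
    simp only [hf, pv_step_eq_modify]
  rw [hfoldA]
  set dA := L.foldl (fun c q => c.modify q.1 [] (fun l => l ++ [q.2])) PySem.Dict.empty with hdA
  have hkeys : dA.keys = PySem.Set.ofList (L.map (fun q => q.1)) := by
    rw [hdA]
    rw [PySem.Dict.keys_foldl_modify_key L (fun q => q.1) [] (fun _ q => fun l => l ++ [q.2]) PySem.Dict.empty]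
    rfl
  have hnodup : dA.keys.Nodup := by
    rw [hdA]
    exact PySem.Dict.nodup_keys_foldl_modify_key L (fun q => q.1) [] (fun _ q => fun l => l ++ [q.2]) PySem.Dict.empty PySem.Dict.nodup_keys_empty
  have hgetD : ∀ p, dA.getD p [] = (L.filter (fun q => q.1 == p)).map (fun q => q.2) := by
    intro p
    rw [hdA, PySem.Dict.getD_foldl_modify_append L PySem.Dict.empty p]
    rfl
  have hitems : dA.items = (PySem.Set.ofList (L.map (fun q => q.1))).map
      (fun p => (p, (L.filter (fun q => q.1 == p)).map (fun q => q.2))) := by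
    rw [pv_items_eq_map_keys dA hnodup, hkeys]
    exact List.map_congr_left (fun p _ => by rw [hgetD p])
  have hnodupfst : (dA.items.map (fun p => p.1)).Nodup := hnodup
  rw [pv_sorted2_eq_sorted dA.items hnodupfst]
  apply PySem.List.sorted_eq_of_perm_of_pairwise_lt
  · -- B's list is a permutation of dA.items
    rw [hitems]
    exact List.Perm.map _ (PySem.List.sorted_perm _ _ _)
  · -- B's list is strictly increasing in its first components
    exact List.Pairwise.map _ (fun a b h => h) (PySem.List.sorted_ofList_pairwise_lt (L.map (fun q => q.1)))
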